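-- pv_equiv track=rewrite | github.com/AMysliwiec/Programming_python-tasks | semestr_3/Lista_3-3s-/zad_2_l3.py | smart_polynomial_value_calc
-- ===== SOURCE A (Python) =====
-- def smart_polynomial_value_calc(coeff, arg):
--     """
--     Function counts the value of the polynomial using Horner's Rule and returns the number of additions
--     and multiplications made
--     :param coeff: a list of factors starting with the intercept
--     :param arg: the argument for which we are calculating the value
--     :return: value, number of multiplications, -||- additions
--     """
--     count_mult, count_add, value = 0, 0, coeff[-1]
--     coeff.reverse()
--
--     if arg == 0:
--         value = coeff[-1]
--         return value, count_mult, count_add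
--
--     for i in coeff[1:]:
--         if arg == 1:
--             if i == 0:
--                 pass
--             else:
--                 value += i
--                 count_mult += 1
--         else:
--             if i == 0:
--                 value *= arg
--                 count_mult += 1
--             else:
--                 value = value * arg + i
--                 count_mult += 1
--                 count_add += 1
--
--     return value, count_mult, count_add
-- ===== SOURCE B (Python) =====
-- def smart_polynomial_value_calc(coeff, arg):
--     # Same in-place coeff.reverse() side effect as the original; return value
--     # is a branch-free Horner fold plus closed-form operation counts.
--     coeff.reverse()
--     value = coeff[0]
--     for c in coeff[1:]:
--         value = value * arg + c
--     if arg == 0: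
--         return value, 0, 0
--     nz = sum(1 for c in coeff[1:] if c != 0)
--     if arg == 1:
--         return value, nz, 0
--     return value, len(coeff) - 1, nz
-- ===== Notes on version B (the rewrite author's own statement) =====
-- stated objective: simpler
-- what changed: Replaces the triple-branched accumulating loop by a branch-free Horner fold for the value and closed-form expressions for the multiplication/addition counts (nonzero-tail count resp. len-1), case-split once on arg.
import Mathlib
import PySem

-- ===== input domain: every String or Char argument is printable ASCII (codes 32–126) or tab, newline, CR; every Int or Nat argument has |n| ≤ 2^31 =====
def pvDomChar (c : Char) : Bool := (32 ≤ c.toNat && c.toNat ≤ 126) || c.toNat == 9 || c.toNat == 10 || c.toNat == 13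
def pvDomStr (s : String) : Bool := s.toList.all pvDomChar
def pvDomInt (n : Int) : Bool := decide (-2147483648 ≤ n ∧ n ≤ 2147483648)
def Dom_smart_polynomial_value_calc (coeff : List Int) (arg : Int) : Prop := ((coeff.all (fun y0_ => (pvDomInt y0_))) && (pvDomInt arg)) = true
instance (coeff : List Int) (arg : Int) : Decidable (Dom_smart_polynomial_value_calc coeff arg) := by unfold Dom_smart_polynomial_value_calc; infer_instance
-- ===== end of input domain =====

-- B computes the same return value with a branch-free Horner fold and closed-form
-- operation counts (objective: simpler); both programs reverse `coeff` in place,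
-- the equivalence proved here is about the return value.


-- ===== PORT A =====
def smart_polynomial_value_calc (coeff : List Int) (arg : Int) : Int × Int × Int :=
  -- count_mult, count_add, value = 0, 0, coeff[-1]  (IndexError on [] → excluded by Pre_)
  match PySem.List.pyGet? coeff (-1) with
  | none => (0, 0, 0)   -- unreachable under Pre_
  | some value0 =>
    let rc := coeff.reverse          -- coeff.reverse()
    if arg = 0 then
      match PySem.List.pyGet? rc (-1) with   -- value = coeff[-1]
      | none => (0, 0, 0)                    -- unreachable under Pre_
      | some v => (v, 0, 0)
    else
      (PySem.List.slice rc (some 1) none).foldl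
        (fun (st : Int × Int × Int) i =>
          let value := st.1
          let cm := st.2.1
          let ca := st.2.2
          if arg = 1 then
            if i = 0 then (value, cm, ca)
            else (value + i, cm + 1, ca)
          else
            if i = 0 then (value * arg, cm + 1, ca)
            else (value * arg + i, cm + 1, ca + 1))
        (value0, 0, 0)

-- ===== PORT B =====
def smart_polynomial_value_calc_alt (coeff : List Int) (arg : Int) : Int × Int × Int :=
  let rc := coeff.reverse            -- coeff.reverse()
  match rc.head? with                -- value = coeff[0]  (IndexError on [] → excluded by Pre_)
  | none => (0, 0, 0)                -- unreachable under Pre_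
  | some h =>
    let value := (PySem.List.slice rc (some 1) none).foldl (fun acc c => acc * arg + c) h
    if arg = 0 then (value, 0, 0)
    else
      let nz : Int := ((PySem.List.slice rc (some 1) none).filter (fun c => decide (c ≠ 0))).length
      if arg = 1 then (value, nz, 0)
      else (value, (rc.length : Int) - 1, nz)

-- ===== PRECONDITION & SPEC =====
-- Pre_ excludes only the empty coefficient list, on which A raises IndexError (coeff[-1]).
def Pre_smart_polynomial_value_calc (coeff : List Int) (arg : Int) : Prop := coeff ≠ []
instance (coeff : List Int) (arg : Int) : Decidable (Pre_smart_polynomial_value_calc coeff arg) := by unfold Pre_smart_polynomial_value_calc; infer_instance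
def pvWitness_smart_polynomial_value_calc : List Int × Int := ([2, -1, 3], 2)

def Spec_smart_polynomial_value_calc (coeff : List Int) (arg : Int) (out : Int × Int × Int) : Prop := out = smart_polynomial_value_calc_alt coeff arg
instance (coeff : List Int) (arg : Int) (out : Int × Int × Int) : Decidable (Spec_smart_polynomial_value_calc coeff arg out) := by unfold Spec_smart_polynomial_value_calc; infer_instance

-- ===== CLAIM (what is proved, stated in full; the proofs are below) =====
def Claim_equal_smart_polynomial_value_calc : Prop := ∀ (coeff : List Int) (arg : Int), Dom_smart_polynomial_value_calc coeff arg → Pre_smart_polynomial_value_calc coeff arg → Spec_smart_polynomial_value_calc coeff arg (smart_polynomial_value_calc coeff arg)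

-- ===== LEMMAS AND PROOFS =====

theorem pv_getLast?_cons (h : Int) (t : List Int) :
    (h :: t).getLast? = some (t.getLastD h) := by
  induction t generalizing h with
  | nil => rfl
  | cons a b ih => rw [List.getLast?_cons_cons, ih a, List.getLastD_cons]

-- arg = 0: the Horner fold degenerates to "last element seen"
theorem fold_horner_zero (l : List Int) (v : Int) :
    l.foldl (fun _ c => c) v = l.getLastD v := by
  induction l generalizing v with
  | nil => rfl
  | cons c t ih => rw [List.foldl_cons, List.getLastD_cons]; exact ih c

-- arg = 1: A's fold accumulates the sum and counts nonzeros in count_mult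
theorem foldA_one (l : List Int) (v cm ca : Int) :
    l.foldl (fun (st : Int × Int × Int) i =>
        if i = 0 then st else (st.1 + i, st.2.1 + 1, st.2.2)) (v, cm, ca)
      = (v + l.sum, cm + ((l.filter fun c => !decide (c = 0)).length : Int), ca) := by
  induction l generalizing v cm ca with
  | nil => simp
  | cons c t ih =>
    by_cases h : c = 0
    · simp [List.foldl_cons, h, ih]
    · simp [List.foldl_cons, h, ih]
      constructor <;> ring
theorem fold_horner_one (l : List Int) (v : Int) :
    l.foldl (fun acc c => acc + c) v = v + l.sum := by
  induction l generalizing v with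
  | nil => simp
  | cons c t ih => simp [List.foldl_cons, ih]; ring

-- arg ∉ {0,1}: A's fold is the Horner fold, mult count = length, add count = nonzeros
theorem foldA_gen (arg : Int) (l : List Int) (v cm ca : Int) :
    l.foldl (fun (st : Int × Int × Int) i =>
        if i = 0 then (st.1 * arg, st.2.1 + 1, st.2.2)
        else (st.1 * arg + i, st.2.1 + 1, st.2.2 + 1)) (v, cm, ca)
      = (l.foldl (fun acc c => acc * arg + c) v, cm + (l.length : Int),
         ca + ((l.filter fun c => !decide (c = 0)).length : Int)) := by
  induction l generalizing v cm ca with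
  | nil => simp
  | cons c t ih =>
    by_cases h : c = 0
    · simp [List.foldl_cons, h, ih]
      omega
    · simp [List.foldl_cons, h, ih]
      omega

-- ===== VERDICT (by name: the statement is the Claim_ definition above) =====
theorem smart_polynomial_value_calc_spec : Claim_equal_smart_polynomial_value_calc := by
  intro coeff arg _ hpre
  unfold Spec_smart_polynomial_value_calc
  unfold Pre_smart_polynomial_value_calc at hpre
  obtain ⟨h, t, hrc⟩ : ∃ h t, coeff.reverse = h :: t := by
    cases hr : coeff.reverse with
    | nil => exact absurd (by simpa using hr) hpre
    | cons a b => exact ⟨a, b, rfl⟩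
  have hlast : PySem.List.pyGet? coeff (-1) = some h := by
    rw [PySem.List.pyGet?_neg_one, ← List.head?_reverse, hrc]; rfl
  unfold smart_polynomial_value_calc smart_polynomial_value_calc_alt
  rw [hlast, hrc]
  simp only [List.head?_cons, PySem.List.slice_from_one, List.tail_cons]
  by_cases h0 : arg = 0
  · subst h0
    rw [PySem.List.pyGet?_neg_one, pv_getLast?_cons]
    simp [fold_horner_zero]
  · by_cases h1 : arg = 1
    · subst h1
      simp [foldA_one, fold_horner_one]
    · simp only [if_neg h0, if_neg h1]
      rw [foldA_gen]
      simp
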